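-- pv_equiv track=rewrite | github.com/HyunJunSik/Coding-practice | 백준/Silver/18111. 마인크래프트/마인크래프트.py | check_can
-- ===== SOURCE A (Python) =====
-- def check_can(arr, target):
--     t = 0
--     want = 0
--     for i in arr:
--         if target > i:
--             t += (target - i)
--             want -= (target - i)
--         elif target < i:
--             t += 2 * (i - target)
--             want += (i - target)
--     return t, want
-- ===== SOURCE B (Python) =====
-- def check_can(arr, target):
--     # Aggregate duplicate heights in a counting dict first, then settle each
--     # distinct height once; t and want are derived at the end from the total
--     # deficit (blocks missing below target) and surplus (blocks above target).
--     cnt = {}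
--     for h in arr:
--         cnt[h] = cnt.get(h, 0) + 1
--     deficit = 0
--     surplus = 0
--     for h, c in cnt.items():
--         if h < target:
--             deficit += (target - h) * c
--         elif h > target:
--             surplus += (h - target) * c
--     return deficit + 2 * surplus, surplus - deficit
-- ===== Notes on version B (the rewrite author's own statement) =====
-- stated objective: alternative
-- what changed: B first groups equal heights into a counting dict and settles each distinct height once with a multiplied cost, accumulating total deficit/surplus, then derives (t, want) = (deficit + 2*surplus, surplus - deficit) at the end, instead of A's single three-way conditional accumulation over every element.
import Mathlib
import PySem

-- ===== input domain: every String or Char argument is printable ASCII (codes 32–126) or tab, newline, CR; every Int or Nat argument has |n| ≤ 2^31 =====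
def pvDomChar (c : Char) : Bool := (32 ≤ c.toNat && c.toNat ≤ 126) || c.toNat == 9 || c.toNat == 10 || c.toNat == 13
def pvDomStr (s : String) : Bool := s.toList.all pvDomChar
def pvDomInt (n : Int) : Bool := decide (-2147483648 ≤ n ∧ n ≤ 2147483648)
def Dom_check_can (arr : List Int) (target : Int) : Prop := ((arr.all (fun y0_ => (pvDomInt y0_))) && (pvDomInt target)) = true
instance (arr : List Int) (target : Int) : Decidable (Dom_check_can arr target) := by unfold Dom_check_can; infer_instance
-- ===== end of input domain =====

-- B groups equal heights into a counting dict and settles each distinct height once,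
-- deriving (t, want) from total deficit/surplus at the end (alternative decomposition).

-- ===== PORT A =====
def check_can (arr : List Int) (target : Int) : Int × Int :=
  arr.foldl (fun tw i =>
    if target > i then (tw.1 + (target - i), tw.2 - (target - i))
    else if target < i then (tw.1 + 2 * (i - target), tw.2 + (i - target))
    else tw) (0, 0)

-- ===== PORT B =====
def check_can_alt (arr : List Int) (target : Int) : Int × Int :=
  -- cnt[h] = cnt.get(h, 0) + 1
  let cnt : PySem.Dict Int Int :=
    arr.foldl (fun d h => d.insert h (d.getD h 0 + 1)) PySem.Dict.empty
  -- for h, c in cnt.items(): …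
  let ds : Int × Int :=
    cnt.items.foldl (fun ds hc =>
      if hc.1 < target then (ds.1 + (target - hc.1) * hc.2, ds.2)
      else if hc.1 > target then (ds.1, ds.2 + (hc.1 - target) * hc.2)
      else ds) (0, 0)
  (ds.1 + 2 * ds.2, ds.2 - ds.1)

-- ===== PRECONDITION & SPEC =====
def Spec_check_can (arr : List Int) (target : Int) (out : Int × Int) : Prop := out = check_can_alt arr target
instance (arr : List Int) (target : Int) (out : Int × Int) : Decidable (Spec_check_can arr target out) := by unfold Spec_check_can; infer_instance

-- ===== CLAIM =====
def Claim_equal_check_can : Prop := ∀ (arr : List Int) (target : Int), Dom_check_can arr target → Spec_check_can arr target (check_can arr target)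

-- ===== LEMMAS AND PROOFS =====
-- A's loop as two per-element sums.
lemma check_can_foldl (target : Int) (arr : List Int) : ∀ (t0 w0 : Int),
    arr.foldl (fun tw i =>
      if target > i then (tw.1 + (target - i), tw.2 - (target - i))
      else if target < i then (tw.1 + 2 * (i - target), tw.2 + (i - target))
      else tw) (t0, w0)
    = (t0 + (arr.map (fun i => if target > i then target - i else if target < i then 2 * (i - target) else 0)).sum,
       w0 + (arr.map (fun i => if target > i then -(target - i) else if target < i then i - target else 0)).sum) := by
  induction arr with
  | nil => intro t0 w0; simp
  | cons i rest ih =>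
    intro t0 w0
    simp only [List.foldl_cons, List.map_cons, List.sum_cons]
    split_ifs with h1 h2 <;> rw [ih] <;> exact Prod.ext (by dsimp only; ring) (by dsimp only; ring)

-- B's items loop as two per-pair sums.
lemma alt_items_foldl (target : Int) (l : List (Int × Int)) : ∀ (d0 s0 : Int),
    l.foldl (fun ds hc =>
      if hc.1 < target then (ds.1 + (target - hc.1) * hc.2, ds.2)
      else if hc.1 > target then (ds.1, ds.2 + (hc.1 - target) * hc.2)
      else ds) (d0, s0)
    = (d0 + (l.map (fun hc => if hc.1 < target then (target - hc.1) * hc.2 else 0)).sum,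
       s0 + (l.map (fun hc => if hc.1 > target then (hc.1 - target) * hc.2 else 0)).sum) := by
  induction l with
  | nil => intro d0 s0; simp
  | cons hc rest ih =>
    intro d0 s0
    simp only [List.foldl_cons, List.map_cons, List.sum_cons]
    by_cases h1 : hc.1 < target
    · have h2 : ¬ hc.1 > target := by omega
      simp only [if_pos h1, if_neg h2]
      rw [ih]; exact Prod.ext (by dsimp only; ring) (by dsimp only; ring)
    · by_cases h2 : hc.1 > target
      · simp only [if_neg h1, if_pos h2]
        rw [ih]; exact Prod.ext (by dsimp only; ring) (by dsimp only; ring)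
      · simp only [if_neg h1, if_neg h2]
        rw [ih]; exact Prod.ext (by dsimp only; ring) (by dsimp only; ring)

-- a sum over the distinct elements weighted by multiplicity equals the per-element sum
lemma sum_count_dedup (xs : List Int) (f : Int → Int) :
    ((PySem.Set.ofList xs).map (fun k => (xs.count k : Int) * f k)).sum = (xs.map f).sum := by
  rw [← List.sum_toFinset _ (PySem.Set.nodup_ofList xs)]
  have h2 : (PySem.Set.ofList xs).toFinset = xs.toFinset := by
    ext y; simp [PySem.Set.mem_ofList]
  rw [h2, Finset.sum_list_map_count]
  simp

theorem check_can_spec : Claim_equal_check_can := by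
  intro arr target _
  unfold Spec_check_can check_can check_can_alt
  have hcnt : arr.foldl (fun d h => d.insert h (d.getD h 0 + 1)) PySem.Dict.empty
      = PySem.Dict.counter arr := rfl
  rw [check_can_foldl]
  simp only [hcnt, PySem.Dict.items_counter, alt_items_foldl, zero_add]
  have hmap1 : ((PySem.Set.ofList arr).map (fun k => (k, (arr.count k : Int)))).map
      (fun hc : Int × Int => if hc.1 < target then (target - hc.1) * hc.2 else 0)
      = (PySem.Set.ofList arr).map (fun k => (arr.count k : Int) *
          (if k < target then target - k else 0)) := by
    rw [List.map_map]; apply List.map_congr_left; intro k _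
    by_cases hk : k < target <;> simp [hk, mul_comm]
  have hmap2 : ((PySem.Set.ofList arr).map (fun k => (k, (arr.count k : Int)))).map
      (fun hc : Int × Int => if hc.1 > target then (hc.1 - target) * hc.2 else 0)
      = (PySem.Set.ofList arr).map (fun k => (arr.count k : Int) *
          (if k > target then k - target else 0)) := by
    rw [List.map_map]; apply List.map_congr_left; intro k _
    by_cases hk : k > target <;> simp [hk, mul_comm]
  rw [hmap1, hmap2, sum_count_dedup, sum_count_dedup]
  have hlin : ∀ (f g : Int → Int) (a b : Int),
      a * (arr.map f).sum + b * (arr.map g).sum = (arr.map (fun i => a * f i + b * g i)).sum := by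
    intro f g a b
    rw [← List.sum_map_mul_left, ← List.sum_map_mul_left, ← List.sum_map_add]
  refine Prod.ext ?_ ?_
  · show _ = (arr.map fun k => if k < target then target - k else 0).sum
        + 2 * (arr.map fun k => if k > target then k - target else 0).sum
    rw [show (arr.map fun k => if k < target then target - k else 0).sum
        + 2 * (arr.map fun k => if k > target then k - target else 0).sum
        = 1 * (arr.map fun k => if k < target then target - k else 0).sum
        + 2 * (arr.map fun k => if k > target then k - target else 0).sum by ring, hlin]
    dsimp only
    congr 1
    apply List.map_congr_left; intro i _
    split_ifs <;> omega
  · show _ = (arr.map fun k => if k > target then k - target else 0).sum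
        - (arr.map fun k => if k < target then target - k else 0).sum
    rw [show (arr.map fun k => if k > target then k - target else 0).sum
        - (arr.map fun k => if k < target then target - k else 0).sum
        = (-1) * (arr.map fun k => if k < target then target - k else 0).sum
        + 1 * (arr.map fun k => if k > target then k - target else 0).sum by ring, hlin]
    dsimp only
    congr 1
    apply List.map_congr_left; intro i _
    split_ifs <;> omega
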